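-- pv_equiv track=rewrite | github.com/Shubham-Choudhury/GeeksforGeeks-Problems | 2024/06 June/Coverage of all Zeros in a Binary Matrix/main.py | FindCoverage
-- ===== SOURCE A (Python) =====
-- def FindCoverage(matrix):
--     n = len(matrix)
--     m = len(matrix[0])
--
--     ans = 0
--
--     for i in range(n):
--         for j in range(m):
--             if matrix[i][j] == 1:
--                 continue
--
--             if i + 1 < n:
--                 ans += matrix[i + 1][j]
--             if j + 1 < m:
--                 ans += matrix[i][j + 1]
--             if i >= 1:
--                 ans += matrix[i - 1][j]
--             if j >= 1:
--                 ans += matrix[i][j - 1]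
--
--     return ans
-- ===== SOURCE B (Python) =====
-- def FindCoverage(matrix):
--     n = len(matrix)
--     m = len(matrix[0])
--
--     ans = 0
--     # Process each grid edge once; each endpoint that is not 1 receives the other endpoint's value.
--     for i in range(n):
--         for j in range(m):
--             if j + 1 < m:
--                 u, v = matrix[i][j], matrix[i][j + 1]
--                 ans += (v if u != 1 else 0) + (u if v != 1 else 0)
--             if i + 1 < n:
--                 u, v = matrix[i][j], matrix[i + 1][j]
--                 ans += (v if u != 1 else 0) + (u if v != 1 else 0)
--     return ans
-- ===== Notes on version B (the rewrite author's own statement) =====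
-- stated objective: alternative
-- what changed: B sums per grid edge (each right/down edge visited once contributes to both non-one endpoints) instead of A's per-cell sum of all four neighbours gated by the cell's zero test.
import Mathlib
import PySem

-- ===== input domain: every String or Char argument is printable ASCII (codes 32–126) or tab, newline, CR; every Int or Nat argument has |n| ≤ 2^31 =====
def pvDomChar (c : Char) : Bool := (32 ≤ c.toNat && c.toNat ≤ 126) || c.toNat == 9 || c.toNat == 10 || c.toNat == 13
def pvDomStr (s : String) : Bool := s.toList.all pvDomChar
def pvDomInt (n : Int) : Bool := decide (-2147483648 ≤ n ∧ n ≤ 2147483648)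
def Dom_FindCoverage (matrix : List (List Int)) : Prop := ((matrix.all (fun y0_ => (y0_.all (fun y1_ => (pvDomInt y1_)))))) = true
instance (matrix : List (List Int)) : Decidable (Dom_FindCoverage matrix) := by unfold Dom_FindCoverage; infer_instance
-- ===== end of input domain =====

-- B processes each grid edge once, adding each endpoint's value to the other non-one endpoint,
-- instead of A's per-cell sum of the four neighbours of every non-one cell (objective: alternative).

-- matrix[i][j] (all accesses are in range under Pre_)
def pvCell (matrix : List (List Int)) (i j : Int) : Int :=
  PySem.List.pyGetD (PySem.List.pyGetD matrix i []) j 0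

-- ===== PORT A =====
def FindCoverage (matrix : List (List Int)) : Int :=
  let n : Int := matrix.length
  let m : Int := (PySem.List.pyGetD matrix 0 []).length
  (PySem.List.pyRange 0 n 1).foldl (fun ans i =>
    (PySem.List.pyRange 0 m 1).foldl (fun ans j =>
      if pvCell matrix i j = 1 then ans
      else
        let a1 := if i + 1 < n then ans + pvCell matrix (i+1) j else ans
        let a2 := if j + 1 < m then a1 + pvCell matrix i (j+1) else a1
        let a3 := if 1 ≤ i then a2 + pvCell matrix (i-1) j else a2
        if 1 ≤ j then a3 + pvCell matrix i (j-1) else a3) ans) 0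

-- ===== PORT B =====
def FindCoverage_alt (matrix : List (List Int)) : Int :=
  let n : Int := matrix.length
  let m : Int := (PySem.List.pyGetD matrix 0 []).length
  (PySem.List.pyRange 0 n 1).foldl (fun ans i =>
    (PySem.List.pyRange 0 m 1).foldl (fun ans j =>
      let a1 :=
        if j + 1 < m then
          ans + (if pvCell matrix i j ≠ 1 then pvCell matrix i (j+1) else 0)
              + (if pvCell matrix i (j+1) ≠ 1 then pvCell matrix i j else 0)
        else ans
      if i + 1 < n then
        a1 + (if pvCell matrix i j ≠ 1 then pvCell matrix (i+1) j else 0)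
           + (if pvCell matrix (i+1) j ≠ 1 then pvCell matrix i j else 0)
      else a1) ans) 0

-- ===== PRECONDITION & SPEC =====
-- Pre_ excludes exactly the inputs on which the Python A raises IndexError:
-- the empty matrix ([] has no matrix[0]) and matrices with a row shorter than row 0.
def Pre_FindCoverage (matrix : List (List Int)) : Prop :=
  matrix ≠ [] ∧ ∀ row ∈ matrix, (PySem.List.pyGetD matrix 0 []).length ≤ row.length
instance (matrix : List (List Int)) : Decidable (Pre_FindCoverage matrix) := by
  unfold Pre_FindCoverage; infer_instance

def pvWitness_FindCoverage : List (List Int) := [[0, 1], [1, 0]]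

def Spec_FindCoverage (matrix : List (List Int)) (out : Int) : Prop := out = FindCoverage_alt matrix
instance (matrix : List (List Int)) (out : Int) : Decidable (Spec_FindCoverage matrix out) := by
  unfold Spec_FindCoverage; infer_instance

-- ===== CLAIM (what is proved, stated in full; the proofs are below) =====
def Claim_equal_FindCoverage : Prop := ∀ (matrix : List (List Int)), Dom_FindCoverage matrix → Pre_FindCoverage matrix → Spec_FindCoverage matrix (FindCoverage matrix)

-- ===== LEMMAS AND PROOFS =====

-- matrix[a][b] at Nat coordinates
def pvG (matrix : List (List Int)) (a b : Nat) : Int := pvCell matrix (a : Int) (b : Int)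

-- A's per-cell term (Int coordinates)
def pvFA (matrix : List (List Int)) (n m i j : Int) : Int :=
  if pvCell matrix i j = 1 then 0 else
    (if i + 1 < n then pvCell matrix (i+1) j else 0)
    + (if j + 1 < m then pvCell matrix i (j+1) else 0)
    + (if 1 ≤ i then pvCell matrix (i-1) j else 0)
    + (if 1 ≤ j then pvCell matrix i (j-1) else 0)

-- B's per-cell term (Int coordinates)
def pvFB (matrix : List (List Int)) (n m i j : Int) : Int :=
  (if j + 1 < m then (if pvCell matrix i j = 1 then 0 else pvCell matrix i (j+1))
      + (if pvCell matrix i (j+1) = 1 then 0 else pvCell matrix i j) else 0)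
  + (if i + 1 < n then (if pvCell matrix i j = 1 then 0 else pvCell matrix (i+1) j)
      + (if pvCell matrix (i+1) j = 1 then 0 else pvCell matrix i j) else 0)

-- fold of range(0,n) adding h at each step is the initial value plus a Finset sum
theorem pv_foldl_sum (h : Int → Int) (a : Int) (n : Nat) :
    (PySem.List.pyRange 0 (n : Int) 1).foldl (fun acc x => acc + h x) a
      = a + ∑ k ∈ Finset.range n, h (k : Int) := by
  induction n generalizing a with
  | zero =>
      rw [PySem.List.pyRange_one_eq_nil (by simp)]
      simp
  | succ k ih =>
      rw [show ((k + 1 : Nat) : Int) = (k : Int) + 1 by push_cast; ring,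
        PySem.List.pyRange_one_succ_right (by positivity)]
      simp [List.foldl_append, ih, Finset.sum_range_succ, add_assoc]

-- nested fold of two ranges adding f i j is a double Finset sum
theorem pv_foldl2_sum (f : Int → Int → Int) (n m : Nat) :
    (PySem.List.pyRange 0 (n : Int) 1).foldl (fun ans i =>
      (PySem.List.pyRange 0 (m : Int) 1).foldl (fun ans j => ans + f i j) ans) 0
      = ∑ i ∈ Finset.range n, ∑ j ∈ Finset.range m, f (i : Int) (j : Int) := by
  have hinner : (fun (ans : Int) (i : Int) =>
      (PySem.List.pyRange 0 (m : Int) 1).foldl (fun ans j => ans + f i j) ans)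
      = fun ans i => ans + ∑ j ∈ Finset.range m, f i (j : Int) := by
    funext ans i; exact pv_foldl_sum (f i) ans m
  rw [hinner, pv_foldl_sum (fun i => ∑ j ∈ Finset.range m, f i (j : Int)) 0 n, zero_add]

-- ∑_{i<n} (shifted term guarded by 1 ≤ i) = ∑_{i<n} (term guarded by i+1 < n)
theorem pv_shiftSum (n : Nat) (F : Nat → Int) :
    (∑ i ∈ Finset.range n, if 1 ≤ i then F (i - 1) else 0)
      = ∑ i ∈ Finset.range n, if i + 1 < n then F i else 0 := by
  cases n with
  | zero => simp
  | succ k =>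
      rw [Finset.sum_range_succ' (fun i => if 1 ≤ i then F (i - 1) else 0) k,
        Finset.sum_range_succ (fun i => if i + 1 < k + 1 then F i else 0) k]
      have h2 : ∀ i ∈ Finset.range k, (if i + 1 < k + 1 then F i else 0) = F i := by
        intro i hi
        simp only [Finset.mem_range] at hi
        simp [Nat.succ_lt_succ hi]
      rw [Finset.sum_congr rfl h2]
      simp

-- the four directed contributions, edge-guard-first form
def pvR (g : Nat → Nat → Int) (m i j : Nat) : Int :=
  if j + 1 < m then (if g i j = 1 then 0 else g i (j+1)) else 0
def pvR' (g : Nat → Nat → Int) (m i j : Nat) : Int :=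
  if j + 1 < m then (if g i (j+1) = 1 then 0 else g i j) else 0
def pvD (g : Nat → Nat → Int) (n i j : Nat) : Int :=
  if i + 1 < n then (if g i j = 1 then 0 else g (i+1) j) else 0
def pvD' (g : Nat → Nat → Int) (n i j : Nat) : Int :=
  if i + 1 < n then (if g (i+1) j = 1 then 0 else g i j) else 0
def pvU (g : Nat → Nat → Int) (i j : Nat) : Int :=
  if 1 ≤ i then (if g i j = 1 then 0 else g (i-1) j) else 0
def pvL (g : Nat → Nat → Int) (i j : Nat) : Int :=
  if 1 ≤ j then (if g i j = 1 then 0 else g i (j-1)) else 0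

theorem pv_L_eq_R' (g : Nat → Nat → Int) (m i : Nat) :
    (∑ j ∈ Finset.range m, pvL g i j) = ∑ j ∈ Finset.range m, pvR' g m i j := by
  have h1 : ∀ j, pvL g i j = if 1 ≤ j then (fun j => if g i (j+1) = 1 then 0 else g i j) (j - 1) else 0 := by
    intro j
    by_cases hj : 1 ≤ j
    · simp only [pvL, hj, if_true, Nat.sub_add_cancel hj]
    · simp [pvL, hj]
  calc (∑ j ∈ Finset.range m, pvL g i j)
      = ∑ j ∈ Finset.range m, if 1 ≤ j then (fun j => if g i (j+1) = 1 then 0 else g i j) (j - 1) else 0 :=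
        Finset.sum_congr rfl (fun j _ => h1 j)
    _ = ∑ j ∈ Finset.range m, if j + 1 < m then (if g i (j+1) = 1 then 0 else g i j) else 0 := by
        exact pv_shiftSum m (fun j => if g i (j+1) = 1 then 0 else g i j)
    _ = ∑ j ∈ Finset.range m, pvR' g m i j := rfl

theorem pv_U_eq_D' (g : Nat → Nat → Int) (n m : Nat) :
    (∑ i ∈ Finset.range n, ∑ j ∈ Finset.range m, pvU g i j)
      = ∑ i ∈ Finset.range n, ∑ j ∈ Finset.range m, pvD' g n i j := by
  rw [Finset.sum_comm, Finset.sum_comm (s := Finset.range n)]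
  refine Finset.sum_congr rfl (fun j _ => ?_)
  have h1 : ∀ i, pvU g i j = if 1 ≤ i then (fun i => if g (i+1) j = 1 then 0 else g i j) (i - 1) else 0 := by
    intro i
    by_cases hi : 1 ≤ i
    · simp only [pvU, hi, if_true, Nat.sub_add_cancel hi]
    · simp [pvU, hi]
  calc (∑ i ∈ Finset.range n, pvU g i j)
      = ∑ i ∈ Finset.range n, if 1 ≤ i then (fun i => if g (i+1) j = 1 then 0 else g i j) (i - 1) else 0 :=
        Finset.sum_congr rfl (fun i _ => h1 i)
    _ = ∑ i ∈ Finset.range n, if i + 1 < n then (if g (i+1) j = 1 then 0 else g i j) else 0 := by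
        exact pv_shiftSum n (fun i => if g (i+1) j = 1 then 0 else g i j)
    _ = ∑ i ∈ Finset.range n, pvD' g n i j := rfl

-- the core identity: per-cell neighbour sums = per-edge two-sided sums
theorem pv_main (g : Nat → Nat → Int) (n m : Nat) :
    (∑ i ∈ Finset.range n, ∑ j ∈ Finset.range m,
      (if g i j = 1 then 0 else
        (if i + 1 < n then g (i+1) j else 0) + (if j + 1 < m then g i (j+1) else 0)
        + (if 1 ≤ i then g (i-1) j else 0) + (if 1 ≤ j then g i (j-1) else 0)))
      = ∑ i ∈ Finset.range n, ∑ j ∈ Finset.range m,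
        ((if j + 1 < m then (if g i j = 1 then 0 else g i (j+1)) + (if g i (j+1) = 1 then 0 else g i j) else 0)
          + (if i + 1 < n then (if g i j = 1 then 0 else g (i+1) j) + (if g (i+1) j = 1 then 0 else g i j) else 0)) := by
  have hA : ∀ i j, (if g i j = 1 then (0:Int) else
        (if i + 1 < n then g (i+1) j else 0) + (if j + 1 < m then g i (j+1) else 0)
        + (if 1 ≤ i then g (i-1) j else 0) + (if 1 ≤ j then g i (j-1) else 0))
      = pvD g n i j + pvR g m i j + pvU g i j + pvL g i j := by
    intro i j
    simp only [pvD, pvR, pvU, pvL]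
    split_ifs <;> ring
  have hB : ∀ i j,
      ((if j + 1 < m then (if g i j = 1 then (0:Int) else g i (j+1)) + (if g i (j+1) = 1 then 0 else g i j) else 0)
        + (if i + 1 < n then (if g i j = 1 then 0 else g (i+1) j) + (if g (i+1) j = 1 then 0 else g i j) else 0))
      = pvD g n i j + pvR g m i j + pvD' g n i j + pvR' g m i j := by
    intro i j
    simp only [pvD, pvD', pvR, pvR']
    split_ifs <;> ring
  rw [Finset.sum_congr rfl (fun i _ => Finset.sum_congr rfl (fun j _ => hA i j)),
    Finset.sum_congr rfl (fun i _ => Finset.sum_congr rfl (fun j _ => hB i j))]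
  simp only [Finset.sum_add_distrib]
  rw [pv_U_eq_D' g n m,
    Finset.sum_congr rfl (fun i (_ : i ∈ Finset.range n) => pv_L_eq_R' g m i)]

-- A's loop body is "accumulator plus A's per-cell term"
theorem pv_bodyA (matrix : List (List Int)) (n m ans i j : Int) :
    (if pvCell matrix i j = 1 then ans
      else
        let a1 := if i + 1 < n then ans + pvCell matrix (i+1) j else ans
        let a2 := if j + 1 < m then a1 + pvCell matrix i (j+1) else a1
        let a3 := if 1 ≤ i then a2 + pvCell matrix (i-1) j else a2
        if 1 ≤ j then a3 + pvCell matrix i (j-1) else a3)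
      = ans + pvFA matrix n m i j := by
  simp only [pvFA]
  split_ifs <;> ring

-- B's loop body is "accumulator plus B's per-edge term"
theorem pv_bodyB (matrix : List (List Int)) (n m ans i j : Int) :
    (let a1 :=
        if j + 1 < m then
          ans + (if pvCell matrix i j ≠ 1 then pvCell matrix i (j+1) else 0)
              + (if pvCell matrix i (j+1) ≠ 1 then pvCell matrix i j else 0)
        else ans
      if i + 1 < n then
        a1 + (if pvCell matrix i j ≠ 1 then pvCell matrix (i+1) j else 0)
           + (if pvCell matrix (i+1) j ≠ 1 then pvCell matrix i j else 0)
      else a1)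
      = ans + pvFB matrix n m i j := by
  simp only [pvFB, ne_eq, ite_not]
  split_ifs <;> ring

-- cast bridge, A side
theorem pv_castA (matrix : List (List Int)) (n m i j : Nat) :
    pvFA matrix (n : Int) (m : Int) (i : Int) (j : Int)
      = (if pvG matrix i j = 1 then 0 else
          (if i + 1 < n then pvG matrix (i+1) j else 0)
          + (if j + 1 < m then pvG matrix i (j+1) else 0)
          + (if 1 ≤ i then pvG matrix (i-1) j else 0)
          + (if 1 ≤ j then pvG matrix i (j-1) else 0)) := by
  have gi : ((i : Int) + 1 < (n : Int)) ↔ (i + 1 < n) := by omega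
  have gj : ((j : Int) + 1 < (m : Int)) ↔ (j + 1 < m) := by omega
  have oi : ((1 : Int) ≤ (i : Int)) ↔ 1 ≤ i := by omega
  have oj : ((1 : Int) ≤ (j : Int)) ↔ 1 ≤ j := by omega
  simp only [pvFA, pvG, gi, gj, oi, oj, Nat.cast_add, Nat.cast_one]
  by_cases hi : 1 ≤ i <;> by_cases hj : 1 ≤ j <;>
    simp [hi, hj, Nat.cast_sub, Nat.cast_one]

-- cast bridge, B side
theorem pv_castB (matrix : List (List Int)) (n m i j : Nat) :
    pvFB matrix (n : Int) (m : Int) (i : Int) (j : Int)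
      = ((if j + 1 < m then (if pvG matrix i j = 1 then 0 else pvG matrix i (j+1))
            + (if pvG matrix i (j+1) = 1 then 0 else pvG matrix i j) else 0)
        + (if i + 1 < n then (if pvG matrix i j = 1 then 0 else pvG matrix (i+1) j)
            + (if pvG matrix (i+1) j = 1 then 0 else pvG matrix i j) else 0)) := by
  have gi : ((i : Int) + 1 < (n : Int)) ↔ (i + 1 < n) := by omega
  have gj : ((j : Int) + 1 < (m : Int)) ↔ (j + 1 < m) := by omega
  simp only [pvFB, pvG, gi, gj, Nat.cast_add, Nat.cast_one]

-- A as a double sum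
theorem pv_A_sum (matrix : List (List Int)) :
    FindCoverage matrix
      = ∑ i ∈ Finset.range matrix.length,
          ∑ j ∈ Finset.range (PySem.List.pyGetD matrix 0 []).length,
            pvFA matrix (matrix.length : Int) ((PySem.List.pyGetD matrix 0 []).length : Int) (i : Int) (j : Int) := by
  unfold FindCoverage
  dsimp only
  rw [show (fun (ans i : Int) =>
      (PySem.List.pyRange 0 ((PySem.List.pyGetD matrix 0 []).length : Int) 1).foldl (fun ans j =>
        if pvCell matrix i j = 1 then ans
        else
          let a1 := if i + 1 < (matrix.length : Int) then ans + pvCell matrix (i+1) j else ans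
          let a2 := if j + 1 < ((PySem.List.pyGetD matrix 0 []).length : Int) then a1 + pvCell matrix i (j+1) else a1
          let a3 := if 1 ≤ i then a2 + pvCell matrix (i-1) j else a2
          if 1 ≤ j then a3 + pvCell matrix i (j-1) else a3) ans)
      = fun ans i => (PySem.List.pyRange 0 ((PySem.List.pyGetD matrix 0 []).length : Int) 1).foldl
          (fun ans j => ans + pvFA matrix (matrix.length : Int) ((PySem.List.pyGetD matrix 0 []).length : Int) i j) ans
      from funext fun ans => funext fun i => by
        apply PySem.List.foldl_congr_mem
        intro acc x _
        exact pv_bodyA matrix (matrix.length : Int) ((PySem.List.pyGetD matrix 0 []).length : Int) acc i x]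
  exact pv_foldl2_sum _ _ _

-- B as a double sum
theorem pv_B_sum (matrix : List (List Int)) :
    FindCoverage_alt matrix
      = ∑ i ∈ Finset.range matrix.length,
          ∑ j ∈ Finset.range (PySem.List.pyGetD matrix 0 []).length,
            pvFB matrix (matrix.length : Int) ((PySem.List.pyGetD matrix 0 []).length : Int) (i : Int) (j : Int) := by
  unfold FindCoverage_alt
  dsimp only
  rw [show (fun (ans i : Int) =>
      (PySem.List.pyRange 0 ((PySem.List.pyGetD matrix 0 []).length : Int) 1).foldl (fun ans j =>
        let a1 :=
          if j + 1 < ((PySem.List.pyGetD matrix 0 []).length : Int) then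
            ans + (if pvCell matrix i j ≠ 1 then pvCell matrix i (j+1) else 0)
                + (if pvCell matrix i (j+1) ≠ 1 then pvCell matrix i j else 0)
          else ans
        if i + 1 < (matrix.length : Int) then
          a1 + (if pvCell matrix i j ≠ 1 then pvCell matrix (i+1) j else 0)
             + (if pvCell matrix (i+1) j ≠ 1 then pvCell matrix i j else 0)
        else a1) ans)
      = fun ans i => (PySem.List.pyRange 0 ((PySem.List.pyGetD matrix 0 []).length : Int) 1).foldl
          (fun ans j => ans + pvFB matrix (matrix.length : Int) ((PySem.List.pyGetD matrix 0 []).length : Int) i j) ans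
      from funext fun ans => funext fun i => by
        apply PySem.List.foldl_congr_mem
        intro acc x _
        exact pv_bodyB matrix (matrix.length : Int) ((PySem.List.pyGetD matrix 0 []).length : Int) acc i x]
  exact pv_foldl2_sum _ _ _

-- ===== VERDICT (by name: the statement is the Claim_ definition above) =====
theorem FindCoverage_spec : Claim_equal_FindCoverage := by
  intro matrix _ _
  unfold Spec_FindCoverage
  rw [pv_A_sum, pv_B_sum]
  calc (∑ i ∈ Finset.range matrix.length,
          ∑ j ∈ Finset.range (PySem.List.pyGetD matrix 0 []).length,
            pvFA matrix (matrix.length : Int) ((PySem.List.pyGetD matrix 0 []).length : Int) (i : Int) (j : Int))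
      = ∑ i ∈ Finset.range matrix.length,
          ∑ j ∈ Finset.range (PySem.List.pyGetD matrix 0 []).length,
            (if pvG matrix i j = 1 then 0 else
              (if i + 1 < matrix.length then pvG matrix (i+1) j else 0)
              + (if j + 1 < (PySem.List.pyGetD matrix 0 []).length then pvG matrix i (j+1) else 0)
              + (if 1 ≤ i then pvG matrix (i-1) j else 0)
              + (if 1 ≤ j then pvG matrix i (j-1) else 0)) :=
        Finset.sum_congr rfl (fun i _ => Finset.sum_congr rfl (fun j _ => pv_castA matrix _ _ i j))
    _ = ∑ i ∈ Finset.range matrix.length,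
          ∑ j ∈ Finset.range (PySem.List.pyGetD matrix 0 []).length,
            ((if j + 1 < (PySem.List.pyGetD matrix 0 []).length then (if pvG matrix i j = 1 then 0 else pvG matrix i (j+1))
                + (if pvG matrix i (j+1) = 1 then 0 else pvG matrix i j) else 0)
              + (if i + 1 < matrix.length then (if pvG matrix i j = 1 then 0 else pvG matrix (i+1) j)
                + (if pvG matrix (i+1) j = 1 then 0 else pvG matrix i j) else 0)) :=
        pv_main (pvG matrix) matrix.length (PySem.List.pyGetD matrix 0 []).length
    _ = ∑ i ∈ Finset.range matrix.length,
          ∑ j ∈ Finset.range (PySem.List.pyGetD matrix 0 []).length,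
            pvFB matrix (matrix.length : Int) ((PySem.List.pyGetD matrix 0 []).length : Int) (i : Int) (j : Int) :=
        (Finset.sum_congr rfl (fun i _ => Finset.sum_congr rfl (fun j _ => pv_castB matrix _ _ i j))).symm
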